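-- pv_equiv track=rewrite | github.com/EdmonMartirosyan/Python | homework1_5.py | possible_turns
-- ===== SOURCE A (Python) =====
-- def possible_turns(cell):
--     letters = "ABCDEFGH"
--     list_ = []
--     a = letters.find(cell[0])+1
--     for i in range(1, 9):
--         for j in letters:
--             b = letters.find(j)+1
--             if abs(int(cell[1]) - i) == 1 and abs(a-b) == 2 or abs(int(cell[1]) - i) == 2 and abs(a-b) == 1:
--                 list_.append(f"{j}{i}")
--     return list_
-- ===== SOURCE B (Python) =====
-- def possible_turns(cell):
--     letters = "ABCDEFGH"
--     a = letters.find(cell[0]) + 1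
--     r = int(cell[1])
--     out = []
--     for dr, dfs in ((-2, (-1, 1)), (-1, (-2, 2)), (1, (-2, 2)), (2, (-1, 1))):
--         rk = r + dr
--         if 1 <= rk <= 8:
--             for df in dfs:
--                 f = a + df
--                 if 1 <= f <= 8:
--                     out.append(f"{letters[f - 1]}{rk}")
--     return out
-- ===== Notes on version B (the rewrite author's own statement) =====
-- stated objective: idiomatic
-- what changed: A scans all 64 board squares (with a letters.find per square) testing the knight-distance predicate; B walks the 8 knight offsets directly, ordered by ascending rank then file so the output order matches without any scan or sort.
import Mathlib
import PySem

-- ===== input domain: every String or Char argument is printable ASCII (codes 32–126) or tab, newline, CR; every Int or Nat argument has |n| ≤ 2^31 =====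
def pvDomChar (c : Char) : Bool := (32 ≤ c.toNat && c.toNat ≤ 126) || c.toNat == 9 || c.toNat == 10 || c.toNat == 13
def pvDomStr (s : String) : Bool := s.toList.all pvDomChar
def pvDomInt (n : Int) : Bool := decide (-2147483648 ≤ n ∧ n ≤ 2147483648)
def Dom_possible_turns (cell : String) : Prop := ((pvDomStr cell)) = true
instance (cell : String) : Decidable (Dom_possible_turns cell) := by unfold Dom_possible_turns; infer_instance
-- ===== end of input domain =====

-- B replaces A's 64-square board scan by a direct walk over the 8 knight offsets,
-- visited in ascending (rank, file) order so no sort is needed (objective: idiomatic direct offset walk).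

-- ===== PORT A =====
-- the 8x8 scan of A: for i in range(1,9): for j in letters: append if knight-distance
def pvLoopA (a r : Int) : List String :=
  (PySem.List.pyRange 1 9 1).foldl (fun acc i =>
    "ABCDEFGH".toList.foldl (fun acc2 j =>
      let b : Int := PySem.Chars.find "ABCDEFGH".toList [j] + 1
      if ((r - i).natAbs = 1 ∧ (a - b).natAbs = 2) ∨ ((r - i).natAbs = 2 ∧ (a - b).natAbs = 1)
      then acc2 ++ [String.ofList [j] ++ PySem.Int.toStr i] else acc2) acc) []

def possible_turns (cell : String) : List String :=
  match PySem.Str.pyGet? cell 0 with          -- cell[0]; none = IndexError, excluded by Pre_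
  | none => []
  | some c0 =>
    let a : Int := PySem.Chars.find "ABCDEFGH".toList [c0] + 1
    match PySem.Str.pyGet? cell 1 with        -- cell[1]; none = IndexError, excluded by Pre_
    | none => []
    | some c1 =>
      match PySem.Int.ofChars? [c1] with      -- int(cell[1]); none = ValueError, excluded by Pre_
      | none => []
      | some r => pvLoopA a r

-- ===== PORT B =====
-- B's loop: rank offsets ascending, file offsets ascending inside each rank
def pvLoopB (a r : Int) : List String :=
  ([(-2, [-1, 1]), (-1, [-2, 2]), (1, [-2, 2]), (2, [-1, 1])] : List (Int × List Int)).foldl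
    (fun out p =>
      let rk := r + p.1
      if 1 ≤ rk ∧ rk ≤ 8 then
        p.2.foldl (fun out2 df =>
          let f := a + df
          if 1 ≤ f ∧ f ≤ 8 then
            out2 ++ [String.ofList [(PySem.Chars.pyGet? "ABCDEFGH".toList (f - 1)).getD ' '] ++ PySem.Int.toStr rk]
          else out2) out
      else out) []

def possible_turns_alt (cell : String) : List String :=
  match PySem.Str.pyGet? cell 0 with
  | none => []
  | some c0 =>
    let a : Int := PySem.Chars.find "ABCDEFGH".toList [c0] + 1
    match PySem.Str.pyGet? cell 1 with
    | none => []
    | some c1 =>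
      match PySem.Int.ofChars? [c1] with
      | none => []
      | some r => pvLoopB a r

-- ===== PRECONDITION & SPEC =====
-- Pre_ excludes exactly the inputs where A raises: cell shorter than 2 (IndexError)
-- or cell[1] not a decimal digit (ValueError from int(cell[1])).
def Pre_possible_turns (cell : String) : Prop :=
  2 ≤ cell.toList.length ∧ (cell.toList.getD 1 ' ').isDigit = true
instance (cell : String) : Decidable (Pre_possible_turns cell) := by unfold Pre_possible_turns; infer_instance
def pvWitness_possible_turns : String := "B1"

def Spec_possible_turns (cell : String) (out : List String) : Prop := out = possible_turns_alt cell
instance (cell : String) (out : List String) : Decidable (Spec_possible_turns cell out) := by unfold Spec_possible_turns; infer_instance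

-- ===== CLAIM (what is proved, stated in full; the proofs are below) =====
def Claim_equal_possible_turns : Prop := ∀ (cell : String), Dom_possible_turns cell → Pre_possible_turns cell → Spec_possible_turns cell (possible_turns cell)

-- ===== LEMMAS AND PROOFS =====
lemma pvLoop_eq_nat : ∀ an ∈ List.range 9, ∀ rn ∈ List.range 10,
    pvLoopA (an : Int) (rn : Int) = pvLoopB (an : Int) (rn : Int) := by decide

lemma pvLoop_eq (a r : Int) (ha0 : 0 ≤ a) (ha8 : a ≤ 8) (hr0 : 0 ≤ r) (hr9 : r ≤ 9) :
    pvLoopA a r = pvLoopB a r := by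
  have h := pvLoop_eq_nat a.toNat (List.mem_range.mpr (by omega)) r.toNat (List.mem_range.mpr (by omega))
  rwa [Int.toNat_of_nonneg ha0, Int.toNat_of_nonneg hr0] at h

lemma pvA_bounds (c : Char) :
    0 ≤ PySem.Chars.find "ABCDEFGH".toList [c] + 1 ∧ PySem.Chars.find "ABCDEFGH".toList [c] + 1 ≤ 8 := by
  by_cases hf : 0 ≤ PySem.Chars.find "ABCDEFGH".toList [c]
  · obtain ⟨hpre, -⟩ := PySem.Chars.find_spec hf
    have hlen := hpre.length_le
    rw [List.length_drop, show ("ABCDEFGH".toList).length = 8 from rfl] at hlen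
    simp only [List.length_cons, List.length_nil] at hlen
    omega
  · have hni : ¬ ([c] <:+: "ABCDEFGH".toList) := by
      intro hi
      exact absurd ((PySem.Chars.find_nonneg_iff _ _).mpr hi) (by omega)
    have := (PySem.Chars.find_eq_neg_one_iff "ABCDEFGH".toList [c]).mpr hni
    omega

lemma pvDigit_mem (c : Char) (h : c.isDigit = true) :
    c ∈ ['0','1','2','3','4','5','6','7','8','9'] := by
  unfold Char.isDigit at h
  rw [Bool.and_eq_true, decide_eq_true_iff, decide_eq_true_iff] at h
  obtain ⟨h1, h2⟩ := h
  rw [ge_iff_le, UInt32.le_iff_toNat_le] at h1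
  rw [UInt32.le_iff_toNat_le] at h2
  have h48 : 48 ≤ c.toNat := h1
  have h57 : c.toNat ≤ 57 := h2
  interval_cases h : c.toNat <;> (rw [← Char.ofNat_toNat c, h]; decide)

-- ===== VERDICT (by name: the statement is the Claim_ definition above) =====
theorem possible_turns_spec : Claim_equal_possible_turns := by
  intro cell _ hpre
  unfold Spec_possible_turns possible_turns possible_turns_alt
  obtain ⟨hlen, hdig⟩ := hpre
  rcases hlist : cell.toList with _ | ⟨c0, _ | ⟨c1, rest⟩⟩
  · rw [hlist] at hlen; simp at hlen
  · rw [hlist] at hlen; simp at hlen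
  · have h0 : PySem.Str.pyGet? cell 0 = some c0 := by
      rw [show (0 : Int) = ((0 : Nat) : Int) from rfl, PySem.Str.pyGet?_natCast, hlist]; rfl
    have h1 : PySem.Str.pyGet? cell 1 = some c1 := by
      rw [show (1 : Int) = ((1 : Nat) : Int) from rfl, PySem.Str.pyGet?_natCast, hlist]; rfl
    rw [h0, h1]
    rw [hlist] at hdig
    simp only [List.getD] at hdig
    have hmem := pvDigit_mem c1 (by simpa using hdig)
    obtain ⟨ha0, ha8⟩ := pvA_bounds c0
    fin_cases hmem <;>
      exact pvLoop_eq _ _ ha0 ha8 (by decide) (by decide)
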